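-- pv_equiv track=rewrite | github.com/jbms/sphinx-immaterial | sphinx_immaterial/apidoc/python/apigen.py | _get_base_docname
-- ===== SOURCE A (Python) =====
-- from typing import (
--     List,
--     Tuple,
--     Any,
--     Optional,
--     Type,
--     cast,
--     Dict,
--     NamedTuple,
--     Iterator,
--     Set,
-- )
--
-- def _get_base_docname(output_prefixes: Dict[str, str], full_name: str) -> str:
--     end_idx = len(full_name)
--     while True:
--         output_path = output_prefixes.get(full_name[:end_idx])
--         if output_path is not None:
--             return output_path + full_name[end_idx + 1 :]
--         new_end_idx = full_name.rfind(".", 0, end_idx)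
--         if new_end_idx == -1:
--             raise ValueError(
--                 f"Could not find output prefix for {full_name!r} in {output_prefixes!r}"
--             )
--         end_idx = new_end_idx
-- ===== SOURCE B (Python) =====
-- def _get_base_docname(output_prefixes, full_name):
--     best_key = None
--     best_path = None
--     for key, output_path in output_prefixes.items():
--         if (full_name == key or full_name.startswith(key + ".")) and (
--             best_key is None or len(key) > len(best_key)
--         ):
--             best_key = key
--             best_path = output_path
--     if best_key is None:
--         raise ValueError(
--             f"Could not find output prefix for {full_name!r} in {output_prefixes!r}"
--         )
--     return best_path + full_name[len(best_key) + 1 :]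
-- ===== Notes on version B (the rewrite author's own statement) =====
-- stated objective: alternative
-- what changed: Instead of repeatedly slicing full_name at descending dot positions and probing the dict, B makes a single pass over the dict items keeping the longest key that is full_name itself or a dot-separated prefix of it, then appends the remaining suffix.
import Mathlib
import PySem

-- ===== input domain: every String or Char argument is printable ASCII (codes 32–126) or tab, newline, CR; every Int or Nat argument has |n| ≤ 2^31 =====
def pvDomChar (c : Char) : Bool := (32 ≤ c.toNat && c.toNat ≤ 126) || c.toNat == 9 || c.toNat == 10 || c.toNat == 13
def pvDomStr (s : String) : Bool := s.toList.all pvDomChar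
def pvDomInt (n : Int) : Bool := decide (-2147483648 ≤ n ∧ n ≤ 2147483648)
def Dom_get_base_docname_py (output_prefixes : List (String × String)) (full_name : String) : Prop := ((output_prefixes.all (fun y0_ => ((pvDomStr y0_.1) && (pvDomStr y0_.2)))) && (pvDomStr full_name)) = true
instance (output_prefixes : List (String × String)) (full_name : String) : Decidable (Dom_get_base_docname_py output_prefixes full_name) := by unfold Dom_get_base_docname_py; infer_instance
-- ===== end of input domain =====

-- B replaces A's descending probe over dotted prefixes of full_name by a single pass over the
-- dict items keeping the longest key that matches (equality or dot-separated prefix); same values.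

-- ===== PORT A =====
-- while-True loop of A; fuel (len+1) only makes the recursion total, each step is A's step
def pvALoop (d : PySem.Dict String String) (full_name : String) : Nat → Int → Option String
  | 0, _ => none
  | fuel + 1, end_idx =>
    match d.get? (PySem.Str.slice full_name none (some end_idx)) with
    | some output_path => some (output_path ++ PySem.Str.slice full_name (some (end_idx + 1)) none)
    | none =>
      let new_end_idx := PySem.Str.rfindFrom full_name "." 0 (some end_idx)
      if new_end_idx = -1 then none
      else pvALoop d full_name fuel new_end_idx

-- the ValueError path is excluded by Pre_; `.getD ""` only totalises it
def get_base_docname_py (output_prefixes : List (String × String)) (full_name : String) : String :=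
  (pvALoop (PySem.Dict.ofList output_prefixes) full_name (full_name.length + 1)
      (full_name.length : Int)).getD ""

-- ===== PORT B =====
def pvMatches (full_name key : String) : Bool :=
  (full_name == key) || PySem.Str.startswith full_name (key ++ ".")

def pvBStep (full_name : String) (best : Option (String × String)) (p : String × String) :
    Option (String × String) :=
  if pvMatches full_name p.1 &&
      (match best with | none => true | some (bk, _) => decide (bk.length < p.1.length))
  then some p else best

-- the ValueError path is excluded by Pre_; `""` only totalises it
def get_base_docname_py_alt (output_prefixes : List (String × String)) (full_name : String) : String :=
  match (PySem.Dict.ofList output_prefixes).items.foldl (pvBStep full_name) none with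
  | some (best_key, best_path) =>
      best_path ++ PySem.Str.slice full_name (some ((best_key.length : Int) + 1)) none
  | none => ""

-- ===== PRECONDITION & SPEC =====
-- Pre_ excludes exactly the inputs on which A raises ValueError (no key equals full_name or is a
-- dot-separated prefix of it); B raises the same ValueError there.
def Pre_get_base_docname_py (output_prefixes : List (String × String)) (full_name : String) : Prop :=
  ∃ p ∈ output_prefixes,
    ((full_name == p.1) || PySem.Str.startswith full_name (p.1 ++ ".")) = true
instance (output_prefixes : List (String × String)) (full_name : String) :
    Decidable (Pre_get_base_docname_py output_prefixes full_name) := by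
  unfold Pre_get_base_docname_py; infer_instance

def pvWitness_get_base_docname_py : (List (String × String)) × String := ([("a", "doc")], "a.b")

def Spec_get_base_docname_py (output_prefixes : List (String × String)) (full_name : String) (out : String) : Prop := out = get_base_docname_py_alt output_prefixes full_name
instance (output_prefixes : List (String × String)) (full_name : String) (out : String) : Decidable (Spec_get_base_docname_py output_prefixes full_name out) := by unfold Spec_get_base_docname_py; infer_instance

-- ===== CLAIM (what is proved, stated in full; the proofs are below) =====
def Claim_equal_get_base_docname_py : Prop := ∀ (output_prefixes : List (String × String)) (full_name : String), Dom_get_base_docname_py output_prefixes full_name → Pre_get_base_docname_py output_prefixes full_name → Spec_get_base_docname_py output_prefixes full_name (get_base_docname_py output_prefixes full_name)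

-- ===== LEMMAS AND PROOFS =====

-- first-match association lookup, the behaviour of Dict.get? on the items list
def passoc : List (String × String) → String → Option String
  | [], _ => none
  | (k, v) :: r, x => if k == x then some v else passoc r x

def pvPfx (s : String) (e : Nat) : String := PySem.Str.slice s none (some (e : Int))
def pvSfx (s : String) (e : Nat) : String := PySem.Str.slice s (some ((e : Int) + 1)) none

-- e is an end position A may probe (end of string or a dot) whose prefix is a present key
def pvGood (L : List (String × String)) (s : String) (e : Nat) : Bool :=
  (decide (e = s.toList.length) || decide (s.toList[e]? = some '.')) && (passoc L (pvPfx s e)).isSome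

-- greatest good position ≤ e
def pvBestD (L : List (String × String)) (s : String) : Nat → Option Nat
  | 0 => if pvGood L s 0 then some 0 else none
  | e + 1 => if pvGood L s (e + 1) then some (e + 1) else pvBestD L s e

-- recursive characterisation of B's fold: earliest pair of maximal matching key length
def pvBp (s : String) : List (String × String) → Option (String × String)
  | [] => none
  | (k, v) :: rest =>
    match pvBp s rest with
    | none => if pvMatches s k then some (k, v) else none
    | some (k', v') =>
      if pvMatches s k && decide (k'.length ≤ k.length) then some (k, v) else some (k', v')

def pvMerge : Option (String × String) → Option (String × String) → Option (String × String)
  | none, r => r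
  | some a, none => some a
  | some (k, v), some (k', v') => if k.length < k'.length then some (k', v') else some (k, v)

theorem pv_dget_eq (d : PySem.Dict String String) (x : String) :
    d.get? x = passoc d.items x := by
  obtain ⟨L⟩ := d
  induction L with
  | nil => simp [PySem.Dict.get?, passoc]
  | cons p r ih =>
    obtain ⟨k, v⟩ := p
    simp only [PySem.Dict.get?, List.find?] at *
    by_cases h : (k == x) = true <;> simp [h, passoc] <;> simpa [PySem.Dict.get?] using ih

theorem pv_matches_iff (s k : String) :
    pvMatches s k = true ↔
      (k.toList <+: s.toList ∧
        (k.toList.length = s.toList.length ∨ s.toList[k.toList.length]? = some '.')) := by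
  constructor
  · intro h
    simp only [pvMatches, Bool.or_eq_true, beq_iff_eq] at h
    rcases h with h | h
    · subst h
      exact ⟨List.prefix_refl _, Or.inl rfl⟩
    · rw [PySem.Str.startswith_eq] at h
      have hp := (PySem.Chars.startswith_iff _ _).mp h
      rw [String.toList_append] at hp
      obtain ⟨t, ht⟩ := hp
      have htl : ".".toList = ['.'] := rfl
      rw [htl] at ht
      constructor
      · exact ⟨'.' :: t, by simpa using ht⟩
      · right
        rw [← ht]
        simp
  · rintro ⟨⟨t, ht⟩, hc | hc⟩
    · -- equal lengths: the strings are equal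
      have hlen := congrArg List.length ht
      rw [List.length_append] at hlen
      have ht0 : t.length = 0 := by omega
      have hteq : t = [] := List.length_eq_zero_iff.mp ht0
      subst hteq
      rw [List.append_nil] at ht
      have hsk : s = k := String.toList_inj.mp ht.symm
      subst hsk
      simp [pvMatches]
    · -- a dot follows the prefix
      have hlt : k.toList.length < s.toList.length := by
        by_contra hge
        rw [List.getElem?_eq_none (by omega)] at hc
        simp at hc
      have ht0 : t[0]? = some '.' := by
        rw [← ht] at hc
        rwa [List.getElem?_append_right (le_refl _), Nat.sub_self] at hc
      obtain ⟨c, t', ht'⟩ : ∃ c t', t = c :: t' := by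
        cases t with
        | nil => simp at ht0
        | cons c t' => exact ⟨c, t', rfl⟩
      subst ht'
      simp at ht0
      subst ht0
      have hsw : PySem.Str.startswith s (k ++ ".") = true := by
        rw [PySem.Str.startswith_eq]
        apply (PySem.Chars.startswith_iff _ _).mpr
        rw [String.toList_append]
        exact ⟨t', by simpa using ht⟩
      unfold pvMatches
      rw [hsw, Bool.or_true]

theorem pv_pfx_toList (s : String) (e : Nat) : (pvPfx s e).toList = s.toList.take e := by
  simp [pvPfx, PySem.List.slice_to_natCast]

theorem pv_passoc_some_mem {L : List (String × String)} {x v : String}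
    (h : passoc L x = some v) : (x, v) ∈ L := by
  induction L with
  | nil => simp [passoc] at h
  | cons p r ih =>
    obtain ⟨k, w⟩ := p
    by_cases hk : (k == x) = true
    · simp [passoc, hk] at h
      simp [(beq_iff_eq ..).mp hk, h]
    · simp [passoc, hk] at h
      exact List.mem_cons_of_mem _ (ih h)

theorem pv_mem_ofList_items {P : List (String × String)} {x v : String}
    (h : (x, v) ∈ P) : ((PySem.Dict.ofList P).get? x).isSome = true := by
  have upd : ∀ (ps : List (String × String)) (d : PySem.Dict String String),
      (d.get? x).isSome = true → ((d.update ps).get? x).isSome = true := by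
    intro ps
    induction ps with
    | nil => intro d hd; simpa [PySem.Dict.update] using hd
    | cons p r ih =>
      intro d hd
      have step : ((d.insert p.1 p.2).get? x).isSome = true := by
        rw [PySem.Dict.get?_insert]
        split
        · rfl
        · exact hd
      have : (d.update (p :: r)) = ((d.insert p.1 p.2).update r) := by
        simp [PySem.Dict.update]
      rw [this]
      exact ih _ step
  have main : ∀ (P : List (String × String)) (d : PySem.Dict String String),
      (x, v) ∈ P → ((d.update P).get? x).isSome = true := by
    intro P
    induction P with
    | nil => intro d hd; simp at hd
    | cons p r ih =>
      intro d hd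
      have hu : (d.update (p :: r)) = ((d.insert p.1 p.2).update r) := by
        simp [PySem.Dict.update]
      rw [hu]
      rcases List.mem_cons.mp hd with h1 | h1
      · apply upd
        cases h1
        simp [PySem.Dict.get?_insert_self]
      · exact ih _ h1
  exact main P _ h

theorem pv_bp_none_iff (s : String) (L : List (String × String)) :
    pvBp s L = none ↔ ∀ p ∈ L, pvMatches s p.1 = false := by
  induction L with
  | nil => simp [pvBp]
  | cons p r ih =>
    obtain ⟨k, v⟩ := p
    cases hr : pvBp s r with
    | none =>
      have hrall := ih.mp hr
      by_cases hm : pvMatches s k = true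
      · constructor
        · intro hbp
          simp only [pvBp, hr] at hbp
          rw [if_pos hm] at hbp
          exact absurd hbp (by simp)
        · intro hall
          exact absurd (hall (k, v) (List.mem_cons_self)) (by simp [hm])
      · constructor
        · intro _ p hp
          rcases List.mem_cons.mp hp with h1 | h1
          · subst h1
            simpa using hm
          · exact hrall p h1
        · intro hall
          simp only [pvBp, hr]
          rw [if_neg hm]
    | some q =>
      obtain ⟨k', v'⟩ := q
      constructor
      · intro hbp
        exfalso
        simp only [pvBp, hr] at hbp
        split at hbp <;> simp at hbp
      · intro hall
        exfalso
        have hn : pvBp s r = none :=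
          ih.mpr (fun p hp => hall p (List.mem_cons_of_mem _ hp))
        rw [hn] at hr
        simp at hr

theorem pv_bp_some {s : String} {L : List (String × String)} {k v : String}
    (h : pvBp s L = some (k, v)) :
    pvMatches s k = true ∧ passoc L k = some v ∧
      ∀ p ∈ L, pvMatches s p.1 = true → p.1.length ≤ k.length := by
  induction L generalizing k v with
  | nil => simp [pvBp] at h
  | cons p r ih =>
    obtain ⟨k0, v0⟩ := p
    cases hr : pvBp s r with
    | none =>
      have hnone := (pv_bp_none_iff s r).mp hr
      simp only [pvBp, hr] at h
      split at h
      · rename_i hm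
        cases h
        refine ⟨hm, by simp [passoc], ?_⟩
        intro p hp hpm
        rcases List.mem_cons.mp hp with h1 | h1
        · subst h1; rfl
        · exact absurd hpm (by simp [hnone p h1])
      · exact absurd h (by simp)
    | some q =>
      obtain ⟨k', v'⟩ := q
      obtain ⟨hm', hl', hb'⟩ := ih hr
      simp only [pvBp, hr] at h
      split at h
      · rename_i hcond
        simp only [Bool.and_eq_true, decide_eq_true_eq] at hcond
        cases h
        refine ⟨hcond.1, by simp [passoc], ?_⟩
        intro p hp hpm
        rcases List.mem_cons.mp hp with h1 | h1
        · subst h1; rfl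
        · exact le_trans (hb' p h1 hpm) hcond.2
      · rename_i hcond
        cases h
        have hne : (k0 == k) = false := by
          by_cases hb : k0 = k
          · exfalso
            apply hcond
            subst hb
            simp [hm']
          · simp [hb]
        refine ⟨hm', by simp [passoc, hne, hl'], ?_⟩
        intro p hp hpm
        rcases List.mem_cons.mp hp with h1 | h1
        · subst h1
          by_contra hgt
          have hgt' : ¬ k0.length ≤ k.length := hgt
          apply hcond
          simp only [Bool.and_eq_true, decide_eq_true_eq]
          exact ⟨hpm, by omega⟩
        · exact hb' p h1 hpm

theorem pv_foldl_merge (s : String) (L : List (String × String))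
    (acc : Option (String × String)) :
    L.foldl (pvBStep s) acc = pvMerge acc (pvBp s L) := by
  induction L generalizing acc with
  | nil => cases acc <;> simp [pvBp, pvMerge]
  | cons p r ih =>
    obtain ⟨k, v⟩ := p
    rw [List.foldl_cons, ih]
    by_cases hm : pvMatches s k = true
    · cases acc with
      | none =>
        cases hq : pvBp s r with
        | none => simp [pvBStep, pvBp, hq, hm, pvMerge]
        | some q =>
          obtain ⟨k', v'⟩ := q
          by_cases h1 : k'.length ≤ k.length
          · have h2 : ¬ k.length < k'.length := by omega
            simp [pvBStep, pvBp, hq, hm, pvMerge, h1, h2]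
          · have h2 : k.length < k'.length := by omega
            simp [pvBStep, pvBp, hq, hm, pvMerge, h1, h2]
      | some a =>
        obtain ⟨ka, va⟩ := a
        cases hq : pvBp s r with
        | none => by_cases h1 : ka.length < k.length <;> simp [pvBStep, pvBp, hq, hm, pvMerge, h1]
        | some q =>
          obtain ⟨k', v'⟩ := q
          by_cases h1 : ka.length < k.length <;> by_cases h2 : k'.length ≤ k.length
          · have h3 : ¬ k.length < k'.length := by omega
            simp [pvBStep, pvBp, hq, hm, pvMerge, h1, h2, h3]
          · have h3 : k.length < k'.length := by omega
            have h4 : ka.length < k'.length := by omega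
            simp [pvBStep, pvBp, hq, hm, pvMerge, h1, h2, h3, h4]
          · have h3 : ¬ ka.length < k'.length := by omega
            simp [pvBStep, pvBp, hq, hm, pvMerge, h1, h2, h3]
          · simp [pvBStep, pvBp, hq, hm, pvMerge, h1, h2]
    · have hstep : pvBStep s acc (k, v) = acc := by
        simp [pvBStep, hm]
      have hbp : pvBp s ((k, v) :: r) = pvBp s r := by
        cases hq : pvBp s r with
        | none => simp [pvBp, hq, hm]
        | some q =>
          obtain ⟨k', v'⟩ := q
          simp [pvBp, hq, hm]
      rw [hstep, hbp]

theorem pv_bestD_none {L : List (String × String)} {s : String} {E : Nat}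
    (h : ∀ d ≤ E, pvGood L s d = false) : pvBestD L s E = none := by
  induction E with
  | zero => simp [pvBestD, h 0 le_rfl]
  | succ e ih =>
    simp [pvBestD, h (e+1) le_rfl]
    exact ih fun d hd => h d (le_trans hd (Nat.le_succ e))

theorem pv_bestD_skip {L : List (String × String)} {s : String} {m E : Nat}
    (h : ∀ i, m < i → i ≤ E → pvGood L s i = false) (hm : m ≤ E) :
    pvBestD L s E = pvBestD L s m := by
  induction E with
  | zero =>
    have : m = 0 := Nat.le_zero.mp hm
    simp [this]
  | succ e ih =>
    rcases Nat.lt_or_ge m (e+1) with hlt | hge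
    · have : pvGood L s (e+1) = false := h (e+1) hlt le_rfl
      simp [pvBestD, this]
      exact ih (fun i h1 h2 => h i h1 (le_trans h2 (Nat.le_succ e))) (Nat.lt_succ_iff.mp hlt)
    · have : m = e + 1 := le_antisymm hm hge
      simp [this]

theorem pv_bestD_eq {L : List (String × String)} {s : String} {d E : Nat}
    (hd : pvGood L s d = true) (h : ∀ i, d < i → i ≤ E → pvGood L s i = false) (hde : d ≤ E) :
    pvBestD L s E = some d := by
  have h1 : pvBestD L s E = pvBestD L s d := pv_bestD_skip h hde
  rw [h1]
  cases d with
  | zero => simp [pvBestD, hd]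
  | succ e => simp [pvBestD, hd]

theorem pv_isPrefix_dot (t : List Char) : ['.'].isPrefixOf t = true ↔ t[0]? = some '.' := by
  cases t with
  | nil => simp [List.isPrefixOf]
  | cons c r =>
    simp [List.isPrefixOf]
    exact eq_comm

theorem pv_isPrefix_dot_drop (s' : List Char) (i : Nat) :
    ['.'].isPrefixOf (s'.drop i) = true ↔ s'[i]? = some '.' := by
  rw [pv_isPrefix_dot, List.getElem?_drop, Nat.add_zero]

theorem pv_go_dot (s' : List Char) (x : Nat) :
    (PySem.Chars.rfind.go s' ['.'] x = -1 ∧ ∀ i ≤ x, s'[i]? ≠ some '.') ∨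
    (∃ j : Nat, j ≤ x ∧ PySem.Chars.rfind.go s' ['.'] x = (j : Int) ∧ s'[j]? = some '.' ∧
      ∀ i, j < i → i ≤ x → s'[i]? ≠ some '.') := by
  induction x with
  | zero =>
    by_cases h : s'[0]? = some '.'
    · have hp : ['.'].isPrefixOf (s'.drop 0) = true := (pv_isPrefix_dot_drop s' 0).mpr h
      rw [List.drop_zero] at hp
      right
      refine ⟨0, le_rfl, ?_, h, fun i h1 h2 => by omega⟩
      simp [PySem.Chars.rfind.go, hp]
    · have hp : ¬ (['.'].isPrefixOf (s'.drop 0) = true) := fun hc => h ((pv_isPrefix_dot_drop s' 0).mp hc)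
      rw [List.drop_zero] at hp
      left
      refine ⟨by simp [PySem.Chars.rfind.go, hp], ?_⟩
      intro i hi
      have : i = 0 := Nat.le_zero.mp hi
      subst this
      exact h
  | succ j ih =>
    by_cases h : s'[j + 1]? = some '.'
    · have hp : ['.'].isPrefixOf (s'.drop (j + 1)) = true := (pv_isPrefix_dot_drop s' (j + 1)).mpr h
      right
      refine ⟨j + 1, le_rfl, ?_, h, fun i h1 h2 => by omega⟩
      simp [PySem.Chars.rfind.go, hp]
    · have hp : ¬ (['.'].isPrefixOf (s'.drop (j + 1)) = true) :=
        fun hc => h ((pv_isPrefix_dot_drop s' (j + 1)).mp hc)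
      have hgo : PySem.Chars.rfind.go s' ['.'] (j + 1) = PySem.Chars.rfind.go s' ['.'] j := by
        simp [PySem.Chars.rfind.go, hp]
      rw [hgo]
      rcases ih with ⟨h1, h2⟩ | ⟨j0, hj0, hgo0, hdot, hnd⟩
      · left
        refine ⟨h1, ?_⟩
        intro i hi
        rcases Nat.lt_or_ge i (j + 1) with hlt | hge
        · exact h2 i (Nat.lt_succ_iff.mp hlt)
        · have : i = j + 1 := by omega
          subst this
          exact h
      · right
        refine ⟨j0, le_trans hj0 (Nat.le_succ _), hgo0, hdot, ?_⟩
        intro i hi1 hi2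
        rcases Nat.lt_or_ge i (j + 1) with hlt | hge
        · exact hnd i hi1 (Nat.lt_succ_iff.mp hlt)
        · have : i = j + 1 := by omega
          subst this
          exact h

theorem pv_rfind_dot (l : List Char) (e : Nat) (he : e ≤ l.length) :
    (PySem.Chars.rfindFrom l ['.'] 0 (some (e : Int)) = -1 ∧ ∀ i < e, l[i]? ≠ some '.') ∨
    (∃ j : Nat, j < e ∧ PySem.Chars.rfindFrom l ['.'] 0 (some (e : Int)) = (j : Int) ∧
      l[j]? = some '.' ∧ ∀ i, j < i → i < e → l[i]? ≠ some '.') := by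
  have h1 : ¬ ((l.length : Int) < (e : Int)) := by
    exact_mod_cast Nat.not_lt.mpr he
  have h2 : ¬ ((e : Int) < (0 : Int)) := Int.not_lt.mpr (Int.natCast_nonneg e)
  have hred : PySem.Chars.rfindFrom l ['.'] 0 (some (e : Int)) =
      (if PySem.Chars.rfind (l.take e) ['.'] = -1 then (-1 : Int)
       else 0 + PySem.Chars.rfind (l.take e) ['.']) := by
    simp [PySem.Chars.rfindFrom, h1, h2]
  have hlen : (l.take e).length = e := by simp [he]
  have hrfind : PySem.Chars.rfind (l.take e) ['.'] = PySem.Chars.rfind.go (l.take e) ['.'] e := by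
    rw [PySem.Chars.rfind, hlen]
  rcases pv_go_dot (l.take e) e with ⟨hg, hnone⟩ | ⟨j, hj, hgoeq, hdot, hnd⟩
  · left
    constructor
    · rw [hred, hrfind, hg]
      simp
    · intro i hi
      have hni := hnone i (Nat.le_of_lt hi)
      rwa [List.getElem?_take_of_lt hi] at hni
  · right
    have hjlt : j < e := by
      by_contra hge
      have hje : j = e := by omega
      subst hje
      rw [List.getElem?_take] at hdot
      simp at hdot
    refine ⟨j, hjlt, ?_, ?_, ?_⟩
    · rw [hred, hrfind, hgoeq]
      rw [if_neg (by omega)]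
      omega
    · rwa [List.getElem?_take_of_lt hjlt] at hdot
    · intro i hi1 hi2
      have hni := hnd i hi1 (Nat.le_of_lt hi2)
      rwa [List.getElem?_take_of_lt hi2] at hni

theorem pv_aloop_eq (d : PySem.Dict String String) (s : String) (fuel e : Nat)
    (he : e ≤ s.toList.length) (hf : e < fuel)
    (hc : e = s.toList.length ∨ s.toList[e]? = some '.') :
    pvALoop d s fuel (e : Int) =
      (pvBestD d.items s e).bind
        (fun j => (passoc d.items (pvPfx s j)).map (fun v => v ++ pvSfx s j)) := by
  induction fuel generalizing e with
  | zero => omega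
  | succ f ih =>
    simp only [pvALoop]
    have hpfx : PySem.Str.slice s none (some (e : Int)) = pvPfx s e := rfl
    rw [hpfx, pv_dget_eq]
    cases hlook : passoc d.items (pvPfx s e) with
    | some v =>
      have hgood : pvGood d.items s e = true := by
        simp only [pvGood, Bool.and_eq_true, Bool.or_eq_true, decide_eq_true_eq]
        refine ⟨?_, by rw [hlook]; rfl⟩
        rcases hc with h | h
        · exact Or.inl h
        · exact Or.inr h
      have hbest : pvBestD d.items s e = some e := by
        cases e with
        | zero => simp [pvBestD, hgood]
        | succ e' => simp [pvBestD, hgood]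
      rw [hbest]
      rw [show (some e).bind
          (fun j => (passoc d.items (pvPfx s j)).map (fun v => v ++ pvSfx s j)) =
          (passoc d.items (pvPfx s e)).map (fun v => v ++ pvSfx s e) from rfl]
      rw [hlook]
      rfl
    | none =>
      have hgood : pvGood d.items s e = false := by
        simp [pvGood, hlook]
      rw [PySem.Str.rfindFrom_eq]
      have hdotl : (".".toList : List Char) = ['.'] := rfl
      rw [hdotl]
      rcases pv_rfind_dot s.toList e he with ⟨heq, hnd⟩ | ⟨j, hjlt, heq, hdot, hnd⟩
      · rw [heq]
        rw [if_pos rfl]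
        have hbest : pvBestD d.items s e = none := by
          apply pv_bestD_none
          intro i hi
          rcases Nat.lt_or_eq_of_le hi with hlt | hEq
          · have hne : i ≠ s.length := by
              have hnn := String.length_toList (s := s)
              omega
            simp [pvGood, hnd i hlt, hne]
          · subst hEq
            exact hgood
        rw [hbest]
        rfl
      · rw [heq]
        rw [if_neg (by omega)]
        have hj2 : j ≤ s.toList.length := by omega
        have hf2 : j < f := by omega
        rw [ih j hj2 hf2 (Or.inr hdot)]
        have hskip : pvBestD d.items s e = pvBestD d.items s j := by
          apply pv_bestD_skip
          · intro i h1 h2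
            rcases Nat.lt_or_eq_of_le h2 with hlt | hEq
            · have hne : i ≠ s.length := by
                have hnn := String.length_toList (s := s)
                omega
              simp [pvGood, hnd i h1 hlt, hne]
            · subst hEq
              exact hgood
          · omega
        rw [hskip]

-- ===== VERDICT (by name: the statement is the Claim_ definition above) =====
theorem get_base_docname_py_spec : Claim_equal_get_base_docname_py := by
  intro P s hdom hpre
  unfold Spec_get_base_docname_py get_base_docname_py get_base_docname_py_alt
  rw [pv_foldl_merge]
  rw [show pvMerge none (pvBp s (PySem.Dict.ofList P).items) =
      pvBp s (PySem.Dict.ofList P).items from rfl]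
  have hn : s.toList.length = s.length := String.length_toList
  have hA := pv_aloop_eq (PySem.Dict.ofList P) s (s.length + 1) s.toList.length
      le_rfl (by omega) (Or.inl rfl)
  rw [hn] at hA
  rw [hA]
  cases hbp : pvBp s (PySem.Dict.ofList P).items with
  | none =>
    exfalso
    obtain ⟨p, hpm, hpmatch⟩ := hpre
    have hisSome := pv_mem_ofList_items (x := p.1) (v := p.2) (by simpa using hpm)
    rw [pv_dget_eq] at hisSome
    obtain ⟨v', hv'⟩ := Option.isSome_iff_exists.mp hisSome
    have hmem := pv_passoc_some_mem hv'
    have hfalse := (pv_bp_none_iff s _).mp hbp _ hmem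
    exact absurd (show pvMatches s p.1 = true from hpmatch) (by simp [hfalse])
  | some q =>
    obtain ⟨k, v⟩ := q
    obtain ⟨hk, hlook, hmax⟩ := pv_bp_some hbp
    obtain ⟨hpref, hcand⟩ := (pv_matches_iff s k).mp hk
    have hDn : k.toList.length ≤ s.toList.length := hpref.length_le
    have hpfxk : pvPfx s k.toList.length = k := by
      apply String.toList_inj.mp
      rw [pv_pfx_toList]
      exact (List.prefix_iff_eq_take.mp hpref).symm
    have hklen : k.length = k.toList.length := String.length_toList.symm
    have hgood : pvGood (PySem.Dict.ofList P).items s k.toList.length = true := by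
      simp only [pvGood, Bool.and_eq_true, Bool.or_eq_true, decide_eq_true_eq]
      refine ⟨?_, by rw [hpfxk, hlook]; rfl⟩
      rcases hcand with h | h
      · exact Or.inl h
      · exact Or.inr h
    have hmaxd : ∀ i, k.toList.length < i → i ≤ s.toList.length →
        pvGood (PySem.Dict.ofList P).items s i = false := by
      intro i h1 h2
      by_contra hg
      have hg' : pvGood (PySem.Dict.ofList P).items s i = true := by simpa using hg
      simp only [pvGood, Bool.and_eq_true, Bool.or_eq_true, decide_eq_true_eq] at hg'
      obtain ⟨hcandi, hsome⟩ := hg'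
      obtain ⟨v', hv'⟩ := Option.isSome_iff_exists.mp hsome
      have hmem := pv_passoc_some_mem hv'
      have hmatchi : pvMatches s (pvPfx s i) = true := by
        apply (pv_matches_iff s _).mpr
        constructor
        · rw [pv_pfx_toList]
          exact List.take_prefix _ _
        · rw [pv_pfx_toList, List.length_take, Nat.min_eq_left h2]
          exact hcandi
      have hle := hmax _ hmem hmatchi
      have hleni : (pvPfx s i).length = i := by
        rw [← String.length_toList, pv_pfx_toList, List.length_take]
        omega
      simp only [hleni] at hle
      omega
    have hbest : pvBestD (PySem.Dict.ofList P).items s s.toList.length = some k.toList.length :=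
      pv_bestD_eq hgood hmaxd hDn
    rw [hn] at hbest
    rw [hbest]
    rw [show (some k.toList.length).bind
        (fun j => (passoc (PySem.Dict.ofList P).items (pvPfx s j)).map (fun v => v ++ pvSfx s j)) =
        (passoc (PySem.Dict.ofList P).items (pvPfx s k.toList.length)).map
          (fun v => v ++ pvSfx s k.toList.length) from rfl]
    rw [hpfxk, hlook]
    show (Option.map (fun v => v ++ pvSfx s k.toList.length) (some v)).getD "" =
        v ++ PySem.Str.slice s (some ((k.length : Int) + 1)) none
    rw [hklen]
    rfl
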